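-- pv_equiv track=rewrite | github.com/winstoncheong/arxiv-fixes | hep-th_9408074v2/convert.py | find_matching_brace
-- ===== SOURCE A (Python) =====
-- def find_matching_brace(text: str, start_pos: int) -> int:
--     """
--     Given a position of an opening brace, find the matching closing brace.
--     Handles nested braces correctly.
--     Returns the position of the closing brace, or -1 if not found.
--     """
--     if start_pos >= len(text) or text[start_pos] != '{':
--         return -1
--
--     brace_count = 1
--     pos = start_pos + 1
--     while pos < len(text) and brace_count > 0:
--         if text[pos] == '{':
--             brace_count += 1
--         elif text[pos] == '}':
--             brace_count -= 1
--         pos += 1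
--
--     if brace_count == 0:
--         return pos - 1  # Return position of closing brace
--     return -1
-- ===== SOURCE B (Python) =====
-- def _scan(text, pos):
--     """Scan forward from pos for the close brace at the current depth.
--
--     Returns its index, or None if the text ends first.  A nested open
--     brace is handled by recursing into it and resuming just past its
--     matching close.
--     """
--     while pos < len(text):
--         c = text[pos]
--         if c == '}':
--             return pos
--         if c == '{':
--             inner = _scan(text, pos + 1)
--             if inner is None:
--                 return None
--             pos = inner
--         pos += 1
--     return None
--
--
-- def find_matching_brace(text: str, start_pos: int) -> int:
--     """
--     Given a position of an opening brace, find the matching closing brace.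
--     Handles nested braces correctly.
--     Returns the position of the closing brace, or -1 if not found.
--     """
--     if start_pos >= len(text) or text[start_pos] != '{':
--         return -1
--     r = _scan(text, start_pos + 1)
--     return -1 if r is None else r
-- ===== Notes on version B (the rewrite author's own statement) =====
-- stated objective: alternative
-- what changed: Replaces the flat depth-counter while-loop with a recursive scanner that recurses into each nested brace and resumes past its matching close, using None (not -1) as the internal not-found sentinel.
import Mathlib
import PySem

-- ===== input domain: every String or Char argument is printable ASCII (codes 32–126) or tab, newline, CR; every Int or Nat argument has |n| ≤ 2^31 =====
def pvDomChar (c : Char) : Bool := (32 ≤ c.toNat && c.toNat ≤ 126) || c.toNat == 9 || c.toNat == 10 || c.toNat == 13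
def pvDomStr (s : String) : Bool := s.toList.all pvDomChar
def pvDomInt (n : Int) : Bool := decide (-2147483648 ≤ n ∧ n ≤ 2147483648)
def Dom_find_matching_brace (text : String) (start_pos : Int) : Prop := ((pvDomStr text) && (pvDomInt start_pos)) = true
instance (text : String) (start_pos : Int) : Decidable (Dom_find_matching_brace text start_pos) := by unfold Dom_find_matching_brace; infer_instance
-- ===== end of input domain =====

-- B replaces A's flat depth-counter loop with a recursive scanner that recurses into each
-- nested brace and resumes past its matching close (alternative decomposition, same cost).

-- ===== PORT A =====
-- the while-loop: state (pos, brace_count), one step per character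
def pvLoopA (text : String) (pos : Int) (count : Int) : Int × Int :=
  if h : pos < PySem.Str.len text ∧ 0 < count then
    pvLoopA text (pos + 1)
      (if PySem.Str.pyGet? text pos = some '{' then count + 1
       else if PySem.Str.pyGet? text pos = some '}' then count - 1 else count)
  else (pos, count)
termination_by (PySem.Str.len text - pos).toNat
decreasing_by omega

def find_matching_brace (text : String) (start_pos : Int) : Int :=
  if start_pos ≥ PySem.Str.len text then -1
  else if PySem.Str.pyGet? text start_pos ≠ some '{' then -1  -- pyGet? none = IndexError (outside Pre_)
  else
    let r := pvLoopA text (start_pos + 1) 1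
    if r.2 = 0 then r.1 - 1 else -1

-- ===== PORT B =====
-- _scan from Source B; the fuel argument only makes the recursion total (never exhausted
-- when started with the fuel find_matching_brace_alt supplies, see pvScanB_fuel below)
def pvScanB : String → Nat → Int → Option Int
  | _, 0, _ => none
  | text, f + 1, pos =>
    if pos < PySem.Str.len text then
      let c := PySem.Str.pyGet? text pos
      if c = some '}' then some pos
      else if c = some '{' then
        match pvScanB text f (pos + 1) with
        | none => none
        | some inner => pvScanB text f (inner + 1)
      else pvScanB text f (pos + 1)
    else none

def find_matching_brace_alt (text : String) (start_pos : Int) : Int :=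
  if start_pos ≥ PySem.Str.len text then -1
  else if PySem.Str.pyGet? text start_pos ≠ some '{' then -1  -- pyGet? none = IndexError (outside Pre_)
  else
    match pvScanB text (2 * (PySem.Str.len text).toNat + 2) (start_pos + 1) with
    | none => -1
    | some r => r

-- ===== PRECONDITION & SPEC =====
-- Pre_ excludes only start_pos < -len(text), where Python's text[start_pos] raises IndexError.
def Pre_find_matching_brace (text : String) (start_pos : Int) : Prop :=
  -(PySem.Str.len text) ≤ start_pos
instance (text : String) (start_pos : Int) : Decidable (Pre_find_matching_brace text start_pos) := by unfold Pre_find_matching_brace; infer_instance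

def pvWitness_find_matching_brace : String × Int := ("{a{b}c}", 0)

def Spec_find_matching_brace (text : String) (start_pos : Int) (out : Int) : Prop := out = find_matching_brace_alt text start_pos
instance (text : String) (start_pos : Int) (out : Int) : Decidable (Spec_find_matching_brace text start_pos out) := by unfold Spec_find_matching_brace; infer_instance

-- ===== CLAIM (what is proved, stated in full; the proofs are below) =====
def Claim_equal_find_matching_brace : Prop := ∀ (text : String) (start_pos : Int), Dom_find_matching_brace text start_pos → Pre_find_matching_brace text start_pos → Spec_find_matching_brace text start_pos (find_matching_brace text start_pos)

-- ===== LEMMAS AND PROOFS =====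

-- one-step unfolding of pvScanB (rfl), to rewrite with instead of letting simp recurse
theorem pvScanB_succ (text : String) (f : Nat) (pos : Int) :
    pvScanB text (f + 1) pos =
      if pos < PySem.Str.len text then
        if PySem.Str.pyGet? text pos = some '}' then some pos
        else if PySem.Str.pyGet? text pos = some '{' then
          match pvScanB text f (pos + 1) with
          | none => none
          | some inner => pvScanB text f (inner + 1)
        else pvScanB text f (pos + 1)
      else none := rfl

-- a scan result is ≥ the scan start
theorem pvScanB_ge (text : String) : ∀ (f : Nat) (pos r : Int), pvScanB text f pos = some r → pos ≤ r := by
  intro f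
  induction f with
  | zero => intro pos r h; simp [pvScanB] at h
  | succ f ih =>
    intro pos r h
    rw [pvScanB_succ] at h
    split_ifs at h with h1 h2 h3
    · exact le_of_eq (Option.some.inj h)
    · cases hin : pvScanB text f (pos + 1) with
      | none => rw [hin] at h; exact absurd h (by simp)
      | some inner =>
        rw [hin] at h
        have h1 := ih (pos + 1) inner hin
        have h2 := ih (inner + 1) r h
        omega
    · have := ih (pos + 1) r h; omega

-- past the end pvScanB is none for any fuel
theorem pvScanB_none_of_ge (text : String) (f : Nat) (pos : Int)
    (h : PySem.Str.len text <= pos) : pvScanB text f pos = none := by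
  cases f with
  | zero => simp [pvScanB]
  | succ f => rw [pvScanB_succ, if_neg (by omega)]

-- fuel irrelevance: any two sufficient fuels give the same scan result
theorem pvScanB_fuel (text : String) : ∀ (f g : Nat) (pos : Int),
    (PySem.Str.len text - pos).toNat <= f → (PySem.Str.len text - pos).toNat <= g →
    pvScanB text f pos = pvScanB text g pos := by
  intro f
  induction f with
  | zero =>
    intro g pos hf hg
    have : PySem.Str.len text <= pos := by omega
    rw [pvScanB_none_of_ge text 0 pos this, pvScanB_none_of_ge text g pos this]
  | succ f ih =>
    intro g pos hf hg
    by_cases hend : PySem.Str.len text <= pos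
    · rw [pvScanB_none_of_ge text _ pos hend, pvScanB_none_of_ge text g pos hend]
    · push_neg at hend
      obtain ⟨g', rfl⟩ : ∃ g', g = g' + 1 := ⟨g - 1, by omega⟩
      rw [pvScanB_succ, pvScanB_succ, if_pos hend, if_pos hend]
      have hrec : pvScanB text f (pos + 1) = pvScanB text g' (pos + 1) :=
        ih g' (pos + 1) (by omega) (by omega)
      split_ifs with h1 h2
      · rfl
      · rw [hrec]
        cases hin : pvScanB text g' (pos + 1) with
        | none => rfl
        | some inner =>
          have hge : pos + 1 <= inner := pvScanB_ge text g' (pos + 1) inner hin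
          exact ih g' (inner + 1) (by omega) (by omega)
      · exact hrec

-- the canonical fuel is sufficient for every scan start ≥ -len
theorem pvFuel_ok (text : String) (pos : Int) (h : -(PySem.Str.len text) <= pos) :
    (PySem.Str.len text - pos).toNat <= 2 * (PySem.Str.len text).toNat + 2 := by
  simp only [PySem.Str.len_eq] at *
  omega

-- the chained-scan view of A's counter: close `count` nested levels, one pvScanB per level
def pvChain (text : String) (pos : Int) (count : Int) : Int :=
  match pvScanB text (2 * (PySem.Str.len text).toNat + 2) pos with
  | none => -1
  | some r => if count <= 1 then r else pvChain text (r + 1) (count - 1)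
termination_by count.toNat
decreasing_by omega

-- MAIN: A's counter loop from (pos, count) equals `count` chained scans
theorem pvMain (text : String) : ∀ (k : Nat) (pos count : Int),
    (PySem.Str.len text - pos).toNat <= k → 1 <= count → -(PySem.Str.len text) <= pos →
    (if (pvLoopA text pos count).2 = 0 then (pvLoopA text pos count).1 - 1 else -1)
      = pvChain text pos count := by
  intro k
  induction k with
  | zero =>
    intro pos count hk hc hp
    have hend : PySem.Str.len text <= pos := by omega
    rw [pvLoopA, dif_neg (by omega)]
    rw [pvChain, pvScanB_none_of_ge text _ pos hend]
    exact if_neg (by omega)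
  | succ k ih =>
    intro pos count hk hc hp
    by_cases hend : PySem.Str.len text <= pos
    · rw [pvLoopA, dif_neg (by omega)]
      rw [pvChain, pvScanB_none_of_ge text _ pos hend]
      exact if_neg (by omega)
    · push_neg at hend
      rw [pvLoopA, dif_pos ⟨hend, by omega⟩]
      rw [pvChain,
        show 2 * (PySem.Str.len text).toNat + 2 = (2 * (PySem.Str.len text).toNat + 1) + 1 from rfl,
        pvScanB_succ, if_pos hend]
      have hfuel : ∀ p : Int, -(PySem.Str.len text) <= p →
          pvScanB text (2 * (PySem.Str.len text).toNat + 1) p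
            = pvScanB text (2 * (PySem.Str.len text).toNat + 2) p := by
        intro p hpp
        exact pvScanB_fuel text _ _ p (by have := pvFuel_ok text p hpp; omega) (pvFuel_ok text p hpp)
      by_cases hbr : PySem.Str.pyGet? text pos = some '}'
      · -- closing brace
        have hco : ¬ PySem.Str.pyGet? text pos = some '{' := by rw [hbr]; simp
        rw [if_pos hbr, if_neg hco, if_pos hbr]
        show _ = (if count <= 1 then pos else pvChain text (pos + 1) (count - 1))
        by_cases h1 : count <= 1
        · have hc1 : count = 1 := by omega
          subst hc1
          rw [pvLoopA, dif_neg (by omega), if_pos h1]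
          norm_num
        · rw [if_neg h1]
          have := ih (pos + 1) (count - 1) (by omega) (by omega) (by omega)
          exact this
      · rw [if_neg hbr, if_neg hbr]
        by_cases hop : PySem.Str.pyGet? text pos = some '{'
        · -- opening brace: A bumps the counter; B recurses into the nested brace
          rw [if_pos hop, if_pos hop]
          rw [ih (pos + 1) (count + 1) (by omega) (by omega) (by omega), pvChain]
          rw [hfuel (pos + 1) (by omega)]
          cases hin : pvScanB text (2 * (PySem.Str.len text).toNat + 2) (pos + 1) with
          | none => rfl
          | some inner =>
            have hge : pos + 1 <= inner := pvScanB_ge text _ (pos + 1) inner hin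
            show (if count + 1 <= 1 then inner else pvChain text (inner + 1) (count + 1 - 1)) = _
            rw [if_neg (by omega), show count + 1 - 1 = count from by omega]
            change pvChain text (inner + 1) count
              = match pvScanB text (2 * (PySem.Str.len text).toNat + 1) (inner + 1) with
                | none => -1
                | some r => if count <= 1 then r else pvChain text (r + 1) (count - 1)
            rw [hfuel (inner + 1) (by omega)]
            rw [pvChain]
        · -- any other character: both sides just advance
          rw [if_neg hop, if_neg hop]
          rw [ih (pos + 1) count (by omega) hc (by omega), pvChain]
          rw [hfuel (pos + 1) (by omega)]

-- ===== VERDICT (by name: the statement is the Claim_ definition above) =====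
theorem find_matching_brace_spec : Claim_equal_find_matching_brace := by
  intro text start_pos _hdom hpre
  unfold Spec_find_matching_brace find_matching_brace find_matching_brace_alt
  by_cases h1 : start_pos >= PySem.Str.len text
  · rw [if_pos h1, if_pos h1]
  · rw [if_neg h1, if_neg h1]
    by_cases h2 : PySem.Str.pyGet? text start_pos ≠ some '{'
    · rw [if_pos h2, if_pos h2]
    · rw [if_neg h2, if_neg h2]
      have hpre' : -(PySem.Str.len text) <= start_pos := hpre
      have hmain := pvMain text (PySem.Str.len text - (start_pos + 1)).toNat (start_pos + 1) 1
        (le_refl _) (by omega) (by omega)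
      simp only [] at hmain ⊢
      rw [hmain, pvChain]
      cases hs : pvScanB text (2 * (PySem.Str.len text).toNat + 2) (start_pos + 1) with
      | none => rfl
      | some r => simp
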